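-- pv_equiv track=rewrite | github.com/Immortalyzy/SoraTranslator | backend/Integrators/Chaos_R/parser.py | parse_selection_label
-- ===== SOURCE A (Python) =====
-- def parse_selection_label(label_line):
--     """extract fallback choices from a label line such as *SEL01|Choice A/Choice B"""
--     pipe_index = label_line.find("|")
--     if pipe_index == -1:
--         return [], []
--
--     labels_text = label_line[pipe_index + 1 :]
--     if labels_text.strip() == "":
--         return [], []
--
--     texts = []
--     text_positions = []
--     current_start = pipe_index + 1
--
--     for index in range(pipe_index + 1, len(label_line)):
--         if label_line[index] in "/／":
--             if current_start < index:
--                 texts.append(label_line[current_start:index])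
--                 text_positions.append((current_start, index))
--             current_start = index + 1
--
--     if current_start < len(label_line):
--         texts.append(label_line[current_start:])
--         text_positions.append((current_start, len(label_line)))
--
--     return texts, text_positions
-- ===== SOURCE B (Python) =====
-- def parse_selection_label(label_line):
--     """extract fallback choices from a label line such as *SEL01|Choice A/Choice B"""
--     pipe_index = label_line.find("|")
--     if pipe_index == -1:
--         return [], []
--
--     labels_text = label_line[pipe_index + 1 :]
--     if labels_text.strip() == "":
--         return [], []
--
--     texts = []
--     text_positions = []
--     pos = pipe_index + 1
--     for piece in labels_text.replace("／", "/").split("/"):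
--         if piece:
--             texts.append(piece)
--             text_positions.append((pos, pos + len(piece)))
--         pos += len(piece) + 1
--     return texts, text_positions
-- ===== Notes on version B (the rewrite author's own statement) =====
-- stated objective: simpler
-- what changed: Replaces A's per-character index loop with running current_start state and slicing by normalising the fullwidth delimiter to the ASCII one, splitting the label text on that delimiter, and emitting each non-empty piece with positions from a cumulative offset.
import Mathlib
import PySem

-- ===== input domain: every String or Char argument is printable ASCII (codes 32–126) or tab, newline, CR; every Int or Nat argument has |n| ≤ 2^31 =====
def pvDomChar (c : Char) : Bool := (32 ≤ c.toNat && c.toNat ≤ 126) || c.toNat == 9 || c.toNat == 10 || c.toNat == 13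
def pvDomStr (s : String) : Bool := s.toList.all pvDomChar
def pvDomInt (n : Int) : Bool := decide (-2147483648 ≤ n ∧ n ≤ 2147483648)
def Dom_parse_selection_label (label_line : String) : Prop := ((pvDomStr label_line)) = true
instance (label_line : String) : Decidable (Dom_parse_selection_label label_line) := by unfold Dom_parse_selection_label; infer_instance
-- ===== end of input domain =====

-- B replaces A's per-character index loop by delimiter-normalising split with cumulative positions (objective: simpler); same return value, no side effects.

-- ===== PORT A =====
-- 'label_line[index] in "/／"' for a single character is membership in {'/', '／'}
def pslA_isDelim (c : Char) : Bool := c == '/' || c == '／'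

-- the body of A's `for index in range(...)` loop; state = (texts, text_positions, current_start)
def pslAStep (L : List Char) (st : List String × List (Int × Int) × Int) (index : Int) :
    List String × List (Int × Int) × Int :=
  if pslA_isDelim (PySem.List.pyGetD L index ' ') then
    if st.2.2 < index then
      (st.1 ++ [String.ofList (PySem.List.slice L (some st.2.2) (some index))],
       st.2.1 ++ [(st.2.2, index)], index + 1)
    else (st.1, st.2.1, index + 1)
  else st

-- A's trailing `if current_start < len(label_line): ...` block
def pslAFin (L : List Char) (st : List String × List (Int × Int) × Int) :
    List String × List (Int × Int) :=
  if st.2.2 < (L.length : Int) then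
    (st.1 ++ [String.ofList (PySem.List.slice L (some st.2.2) none)],
     st.2.1 ++ [(st.2.2, (L.length : Int))])
  else (st.1, st.2.1)

def parse_selection_label (label_line : String) : List String × (List (Int × Int)) :=
  let L := label_line.toList
  let pipe_index : Int := PySem.Str.find label_line "|"
  if pipe_index = -1 then ([], [])
  else
    let labels_text := PySem.List.slice L (some (pipe_index + 1)) none
    if PySem.Chars.strip labels_text = [] then ([], [])
    else
      pslAFin L
        ((PySem.List.pyRange (pipe_index + 1) (PySem.Str.len label_line) 1).foldl
          (pslAStep L) ([], [], pipe_index + 1))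

-- ===== PORT B =====
-- single-character str.replace("／", "/") is a character map
def pslB_norm (c : Char) : Char := if c = '／' then '/' else c

-- the body of B's `for piece in ...` loop; state = (texts, text_positions, pos)
def pslBStep (st : List String × List (Int × Int) × Int) (piece : List Char) :
    List String × List (Int × Int) × Int :=
  if piece ≠ [] then
    (st.1 ++ [String.ofList piece], st.2.1 ++ [(st.2.2, st.2.2 + piece.length)],
     st.2.2 + piece.length + 1)
  else (st.1, st.2.1, st.2.2 + piece.length + 1)

def parse_selection_label_alt (label_line : String) : List String × (List (Int × Int)) :=
  let pipe_index : Int := PySem.Str.find label_line "|"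
  if pipe_index = -1 then ([], [])
  else
    let labels_text := PySem.List.slice label_line.toList (some (pipe_index + 1)) none
    if PySem.Chars.strip labels_text = [] then ([], [])
    else
      -- str.split("/") on the single-character separator is List.splitOn '/'
      let st := ((labels_text.map pslB_norm).splitOn '/').foldl pslBStep ([], [], pipe_index + 1)
      (st.1, st.2.1)

-- ===== PRECONDITION & SPEC =====
def Spec_parse_selection_label (label_line : String) (out : List String × (List (Int × Int))) : Prop := out = parse_selection_label_alt label_line
instance (label_line : String) (out : List String × (List (Int × Int))) : Decidable (Spec_parse_selection_label label_line out) := by unfold Spec_parse_selection_label; infer_instance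

-- ===== CLAIM (what is proved, stated in full; the proofs are below) =====
def Claim_equal_parse_selection_label : Prop := ∀ (label_line : String), Dom_parse_selection_label label_line → Spec_parse_selection_label label_line (parse_selection_label label_line)

-- ===== LEMMAS AND PROOFS =====

-- Reference scanner both loops are reduced to: walk `rest`, carrying the pending
-- run `pending` that started at absolute position `pstart`.
def pslRef : List Char → Int → List Char → List String → List (Int × Int) →
    List String × List (Int × Int)
  | pending, pstart, [], t, ps =>
    if pending ≠ [] then
      (t ++ [String.ofList pending], ps ++ [(pstart, pstart + pending.length)])
    else (t, ps)
  | pending, pstart, c :: rest, t, ps =>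
    if pslA_isDelim c then
      if pending ≠ [] then
        pslRef [] (pstart + pending.length + 1) rest
          (t ++ [String.ofList pending]) (ps ++ [(pstart, pstart + pending.length)])
      else pslRef [] (pstart + 1) rest t ps
    else pslRef (pending ++ [c]) pstart rest t ps

lemma pslA_loop (L : List Char) (d k cs : Nat) (hd : L.length - k = d) (hk : k ≤ L.length)
    (hcs : cs ≤ k) (t : List String) (ps : List (Int × Int)) :
    pslAFin L ((PySem.List.pyRange (k : Int) (L.length : Int) 1).foldl (pslAStep L) (t, ps, (cs : Int)))
    = pslRef ((L.drop cs).take (k - cs)) (cs : Int) (L.drop k) t ps := by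
  induction d generalizing k cs t ps with
  | zero =>
    have hkl : k = L.length := by omega
    subst hkl
    rw [PySem.List.pyRange_one_eq_nil (le_refl _)]
    simp only [List.foldl_nil, pslAFin]
    have hpend : (L.drop cs).take (L.length - cs) = L.drop cs := by
      apply List.take_of_length_le; simp
    rw [hpend, List.drop_length]
    by_cases hlt : cs < L.length
    · rw [if_pos (by exact_mod_cast hlt)]
      have hne : L.drop cs ≠ [] := by
        simp [List.drop_eq_nil_iff]; omega
      rw [pslRef, if_pos hne]
      have hslice : PySem.List.slice L (some (cs : Int)) none = L.drop cs := by
        rw [PySem.List.slice_from_natCast]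
      rw [hslice]
      have hlen : (cs : Int) + ((L.drop cs).length : Int) = (L.length : Int) := by
        simp; omega
      rw [hlen]
    · rw [if_neg (by exact_mod_cast hlt)]
      have heq : L.drop cs = [] := by simp [List.drop_eq_nil_iff]; omega
      rw [heq, pslRef, if_neg (by simp)]
  | succ d ih =>
    have hklt : k < L.length := by omega
    rw [PySem.List.pyRange_one_cons (by exact_mod_cast hklt)]
    rw [List.foldl_cons]
    have hget : PySem.List.pyGetD L (k : Int) ' ' = L[k] := by
      rw [PySem.List.pyGetD_natCast, List.getD_eq_getElem _ _ hklt]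
    have hdropk : L.drop k = L[k] :: L.drop (k + 1) := List.drop_eq_getElem_cons hklt
    have hcast : (k : Int) + 1 = ((k + 1 : Nat) : Int) := by push_cast; ring
    by_cases hdel : pslA_isDelim L[k]
    · by_cases hlt : cs < k
      · have hpne : (L.drop cs).take (k - cs) ≠ [] := by
          simp [List.take_eq_nil_iff, List.drop_eq_nil_iff]
          omega
        have hlenp : (((L.drop cs).take (k - cs)).length : Int) = (k : Int) - (cs : Int) := by
          simp; omega
        have hlt' : (cs : Int) < (k : Int) := by exact_mod_cast hlt
        simp only [pslAStep, hget, hdel]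
        rw [if_pos hlt', if_pos trivial]
        have hslice : PySem.List.slice L (some (cs : Int)) (some (k : Int)) =
            (L.drop cs).take (k - cs) := by
          rw [PySem.List.slice_natCast]
        rw [hslice, hcast]
        rw [ih (k + 1) (k + 1) (by omega) (by omega) (le_refl _)]
        rw [hdropk, pslRef, if_pos hdel, if_pos hpne]
        have h1 : ((k + 1 : Nat) : Int) = (cs : Int) + (((L.drop cs).take (k - cs)).length : Int) + 1 := by
          rw [hlenp]; push_cast; ring
        have h2 : (cs : Int) + (((L.drop cs).take (k - cs)).length : Int) = (k : Int) := by
          rw [hlenp]; ring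
        simp only [Nat.sub_self, List.take_zero]
        rw [h2, hcast]
      · have hcsk : cs = k := by omega
        have hlt' : ¬ ((cs : Int) < (k : Int)) := by omega
        simp only [pslAStep, hget, hdel]
        rw [if_neg hlt', if_pos trivial]
        rw [hcast, ih (k + 1) (k + 1) (by omega) (by omega) (le_refl _)]
        rw [hcsk, hdropk]
        simp only [Nat.sub_self, List.take_zero]
        rw [pslRef, if_pos hdel, if_neg (by simp), hcast]
    · simp only [pslAStep, hget, hdel, Bool.false_eq_true]
      rw [if_neg not_false]
      rw [hcast, ih (k + 1) cs (by omega) (by omega) (by omega)]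
      have hpend : (L.drop cs).take (k + 1 - cs) = (L.drop cs).take (k - cs) ++ [L[k]] := by
        have h1 : k + 1 - cs = (k - cs) + 1 := by omega
        rw [h1, List.take_add_one]
        congr 1
        rw [List.getElem?_drop]
        have h2 : cs + (k - cs) = k := by omega
        rw [h2, List.getElem?_eq_getElem hklt]
        rfl
      rw [hpend, hdropk, pslRef, if_neg (by simp [hdel])]

lemma pslB_splitOn_no_delim (pending : List Char) (h : ∀ c ∈ pending, pslA_isDelim c = false) :
    pending.splitOn '/' = [pending] := by
  induction pending with
  | nil => rfl
  | cons c cs ih =>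
    have hc : (c == '/') = false := by
      have := h c (by simp)
      simp only [pslA_isDelim, Bool.or_eq_false_iff] at this
      exact this.1
    have hih := ih (fun x hx => h x (by simp [hx]))
    simp only [List.splitOn] at hih ⊢
    rw [List.splitOnP_cons, hc, hih]
    simp

lemma pslB_splitOn_append (pending zs : List Char) (h : ∀ c ∈ pending, pslA_isDelim c = false) :
    (pending ++ '/' :: zs).splitOn '/' = pending :: zs.splitOn '/' := by
  induction pending with
  | nil => simp [List.splitOn, List.splitOnP_cons]
  | cons c cs ih =>
    have hc : (c == '/') = false := by
      have := h c (by simp)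
      simp only [pslA_isDelim, Bool.or_eq_false_iff] at this
      exact this.1
    have hih := ih (fun x hx => h x (by simp [hx]))
    simp only [List.splitOn, List.cons_append] at hih ⊢
    rw [List.splitOnP_cons, hc, hih]
    simp

lemma pslB_map_norm (pending : List Char) (h : ∀ c ∈ pending, pslA_isDelim c = false) :
    pending.map pslB_norm = pending := by
  induction pending with
  | nil => rfl
  | cons c cs ih =>
    have := h c (by simp)
    simp only [pslA_isDelim, Bool.or_eq_false_iff, beq_eq_false_iff_ne] at this
    simp [pslB_norm, this.2, ih (fun x hx => h x (by simp [hx]))]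

lemma pslB_loop (rest pending : List Char) (h : ∀ c ∈ pending, pslA_isDelim c = false)
    (pstart : Int) (t : List String) (ps : List (Int × Int)) :
    (let st := (((pending ++ rest).map pslB_norm).splitOn '/').foldl pslBStep (t, ps, pstart)
     (st.1, st.2.1))
    = pslRef pending pstart rest t ps := by
  induction rest generalizing pending pstart t ps with
  | nil =>
    simp only [List.append_nil, pslB_map_norm pending h, pslB_splitOn_no_delim pending h]
    simp only [List.foldl_cons, List.foldl_nil, pslBStep, pslRef]
    by_cases hp : pending = [] <;> simp [hp]
  | cons c rest ih =>
    by_cases hdel : pslA_isDelim c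
    · have hnc : pslB_norm c = '/' := by
        simp only [pslA_isDelim, Bool.or_eq_true, beq_iff_eq] at hdel
        rcases hdel with h1 | h1 <;> simp [pslB_norm, h1]
      have : (pending ++ c :: rest).map pslB_norm = pending ++ '/' :: rest.map pslB_norm := by
        simp [pslB_map_norm pending h, hnc]
      rw [this, pslB_splitOn_append pending _ h]
      simp only [List.foldl_cons]
      by_cases hp : pending = []
      · subst hp
        have := ih [] (by simp) (pstart + 1) t ps
        simp only [List.nil_append] at this ⊢
        simp [pslRef, hdel, pslBStep]
        simpa [pslBStep] using this
      · have := ih [] (by simp) (pstart + pending.length + 1) (t ++ [String.ofList pending])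
          (ps ++ [(pstart, pstart + pending.length)])
        simp only [List.nil_append] at this
        simp [pslRef, hdel, hp]
        simpa [pslBStep, hp] using this
    · have hdel' : ¬ c = '/' ∧ ¬ c = '／' := by
        simpa [pslA_isDelim, not_or] using hdel
      have hnc : pslB_norm c = c := by simp [pslB_norm, hdel'.2]
      have hre : pending ++ c :: rest = (pending ++ [c]) ++ rest := by simp
      rw [hre]
      have hp' : ∀ x ∈ pending ++ [c], pslA_isDelim x = false := by
        intro x hx
        rcases List.mem_append.mp hx with hx | hx
        · exact h x hx
        · simp at hx; subst hx; simp [pslA_isDelim, hdel'.1, hdel'.2]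
      rw [ih (pending ++ [c]) hp' pstart t ps]
      simp [pslRef, hdel]

theorem psl_main (s : String) :
    parse_selection_label s = parse_selection_label_alt s := by
  unfold parse_selection_label parse_selection_label_alt
  by_cases h1 : PySem.Str.find s "|" = -1
  · rw [if_pos h1, if_pos h1]
  · rw [if_neg h1, if_neg h1]
    set L := s.toList with hL
    set p : Int := PySem.Str.find s "|" with hp
    by_cases h2 : PySem.Chars.strip (PySem.List.slice L (some (p + 1)) none) = []
    · rw [if_pos h2, if_pos h2]
    · rw [if_neg h2, if_neg h2]
      have hneg1 : (-1 : Int) ≤ p := by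
        rw [hp, PySem.Str.find_eq]; exact PySem.Chars.neg_one_le_find _ _
      have hp0 : (0 : Int) ≤ p + 1 := by omega
      have hk1 : (((p + 1).toNat : Nat) : Int) = p + 1 := Int.toNat_of_nonneg hp0
      set k : Nat := (p + 1).toNat with hkdef
      have hlab : PySem.List.slice L (some (p + 1)) none = L.drop k := by
        rw [← hk1, PySem.List.slice_from_natCast]
      have hdropne : L.drop k ≠ [] := by
        intro h; exact h2 (by rw [hlab, h]; rfl)
      have hkle : k ≤ L.length := by
        by_contra hgt
        exact hdropne (List.drop_eq_nil_iff.mpr (by omega))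
      have hlen : PySem.Str.len s = (L.length : Int) := by
        rw [PySem.Str.len_eq, hL]
      rw [hlab, hlen, ← hk1]
      rw [pslA_loop L (L.length - k) k k rfl hkle (le_refl _)]
      have hB := pslB_loop (L.drop k) [] (by simp) ((k : Nat) : Int) [] []
      simp only [List.nil_append] at hB
      simp only [Nat.sub_self, List.take_zero]
      exact hB.symm

-- ===== VERDICT (by name: the statement is the Claim_ definition above) =====
theorem parse_selection_label_spec : Claim_equal_parse_selection_label := by
  intro s _
  unfold Spec_parse_selection_label
  exact psl_main s
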